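-- pv_equiv track=rewrite | github.com/Renelvon/codeforces | prob2/A/solve.py | calc_winner
-- ===== SOURCE A (Python) =====
-- import collections
--
-- def calc_winner(rounds):
--     scores = collections.defaultdict(int)
--     for name, score in rounds:
--         old_score = scores[name]
--         new_score = old_score + score
--         scores[name] = new_score
--
--     win_score = max(scores.values())
--     possible_winners = {
--         name: 0
--         for name, score in scores.items()
--         if score == win_score
--     }
--     for name, score in rounds:
--         old_score = possible_winners.get(name)
--         if old_score is not None:
--             new_score = old_score + score
--             if new_score >= win_score:
--                 return name
--             else:
--                 possible_winners[name] = new_score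
-- ===== SOURCE B (Python) =====
-- def calc_winner(rounds):
--     scores = {}
--     for name, score in rounds:
--         scores[name] = scores.get(name, 0) + score
--     win_score = max(scores.values())
--     candidates = [name for name, sc in scores.items() if sc == win_score]
--     best_idx = None
--     best_name = None
--     for cand in candidates:
--         total = 0
--         for i, (name, score) in enumerate(rounds):
--             if name == cand:
--                 total += score
--                 if total >= win_score:
--                     if best_idx is None or i < best_idx:
--                         best_idx = i
--                         best_name = cand
--                     break
--     return best_name
-- ===== Notes on version B (the rewrite author's own statement) =====
-- stated objective: alternative
-- what changed: A replays all rounds once in an interleaved loop over a shared dict of candidate running totals with an early return; B instead loops over each top-scoring candidate independently, finds that candidate's first threshold-crossing round index, and returns the candidate with the smallest such index (an argmin over per-candidate scans).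
import Mathlib
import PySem

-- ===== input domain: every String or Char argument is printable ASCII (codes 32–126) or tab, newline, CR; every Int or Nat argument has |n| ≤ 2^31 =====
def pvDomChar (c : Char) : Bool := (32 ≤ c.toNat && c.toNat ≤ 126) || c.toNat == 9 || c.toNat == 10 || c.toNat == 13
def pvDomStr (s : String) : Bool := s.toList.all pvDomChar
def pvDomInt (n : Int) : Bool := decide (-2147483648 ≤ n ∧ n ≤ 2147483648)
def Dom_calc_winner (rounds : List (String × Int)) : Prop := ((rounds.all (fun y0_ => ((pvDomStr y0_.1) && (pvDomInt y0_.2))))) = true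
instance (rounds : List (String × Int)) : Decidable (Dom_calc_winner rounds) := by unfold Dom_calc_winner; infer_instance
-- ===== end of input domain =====

-- B replaces A's interleaved early-return replay by an outer loop over the top-scoring
-- candidates, each scanned independently for its first threshold-crossing round index,
-- followed by an argmin over those indices (objective: alternative decomposition).

-- ===== PORT A =====
-- the second 'for name, score in rounds' loop of A, with its early return (none = fell through)
def pvLoopA (win : Int) (pw : PySem.Dict String Int) : List (String × Int) → Option String
  | [] => none
  | (name, score) :: rest =>
    match pw.get? name with
    | none => pvLoopA win pw rest
    | some old =>
      let newScore := old + score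
      if win ≤ newScore then some name
      else pvLoopA win (pw.insert name newScore) rest

def calc_winner (rounds : List (String × Int)) : String :=
  -- scores: defaultdict(int) accumulated over rounds (reading scores[name] defaults to 0)
  let scores := rounds.foldl (fun d (p : String × Int) => d.insert p.1 (d.getD p.1 0 + p.2)) PySem.Dict.empty
  -- win_score = max(scores.values())  (ValueError on empty rounds: excluded by Pre_)
  let winScore := (PySem.List.max? scores.values (fun v => v)).getD 0
  -- possible_winners = {name: 0 for name, score in scores.items() if score == win_score}
  let pw := (scores.items.filter (fun p => decide (p.2 = winScore))).foldl
      (fun d (p : String × Int) => d.insert p.1 0) PySem.Dict.empty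
  -- replay loop; the fall-through 'return None' never happens on Pre_, totalized with ""
  (pvLoopA winScore pw rounds).getD ""

-- ===== PORT B =====
-- inner 'for i, (name, score) in enumerate(rounds)' loop of B for one candidate:
-- first index i at which cand's running total reaches win (none = no crossing / no break)
def pvFirstCross (win : Int) (cand : String) : List (String × Int) → Int → Int → Option Int
  | [], _, _ => none
  | (name, score) :: rest, total, i =>
    if name = cand then
      let t := total + score
      if win ≤ t then some i else pvFirstCross win cand rest t (i + 1)
    else pvFirstCross win cand rest total (i + 1)

def calc_winner_alt (rounds : List (String × Int)) : String :=
  let scores := rounds.foldl (fun d (p : String × Int) => d.insert p.1 (d.getD p.1 0 + p.2)) PySem.Dict.empty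
  let winScore := (PySem.List.max? scores.values (fun v => v)).getD 0
  let cands := (scores.items.filter (fun p => decide (p.2 = winScore))).map (·.1)
  -- outer loop over candidates, keeping the (best_idx, best_name) argmin
  let best := cands.foldl (fun best c =>
      match pvFirstCross winScore c rounds 0 0 with
      | none => best
      | some i =>
        match best with
        | none => some (i, c)
        | some (bi, bn) => if i < bi then some (i, c) else some (bi, bn)) none
  -- best_name is never None on Pre_; totalized with ""
  ((best.map (·.2)).getD "")

-- ===== PRECONDITION & SPEC =====
-- Pre_ excludes only the empty list, on which Python A (and B) raise ValueError (max of empty sequence).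
def Pre_calc_winner (rounds : List (String × Int)) : Prop := rounds ≠ []
instance (rounds : List (String × Int)) : Decidable (Pre_calc_winner rounds) := by unfold Pre_calc_winner; infer_instance
def pvWitness_calc_winner : (List (String × Int)) := [("a", 1), ("b", 2)]

def Spec_calc_winner (rounds : List (String × Int)) (out : String) : Prop := out = calc_winner_alt rounds
instance (rounds : List (String × Int)) (out : String) : Decidable (Spec_calc_winner rounds out) := by unfold Spec_calc_winner; infer_instance

-- ===== CLAIM (what is proved, stated in full; the proofs are below) =====
def Claim_equal_calc_winner : Prop := ∀ (rounds : List (String × Int)), Dom_calc_winner rounds → Pre_calc_winner rounds → Spec_calc_winner rounds (calc_winner rounds)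

-- ===== LEMMAS AND PROOFS =====

-- the argmin step of B's outer loop, abstracted over the per-candidate scan f
def pvBestStep (f : String → Int → Option Int) (best : Option (Int × String)) (p : String × Int) : Option (Int × String) :=
  match f p.1 p.2 with
  | none => best
  | some i =>
    match best with
    | none => some (i, p.1)
    | some (bi, bn) => if i < bi then some (i, p.1) else some (bi, bn)

def pvBestFold (f : String → Int → Option Int) (cts : List (String × Int)) (acc : Option (Int × String)) : Option (Int × String) :=
  cts.foldl (pvBestStep f) acc

theorem pvFirstCross_shift (win : Int) (c : String) (xs : List (String × Int)) :
    ∀ (t i : Int), pvFirstCross win c xs t (i + 1) = (pvFirstCross win c xs t i).map (· + 1) := by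
  induction xs with
  | nil => intro t i; simp [pvFirstCross]
  | cons p rest ih =>
    intro t i
    obtain ⟨name, score⟩ := p
    simp only [pvFirstCross]
    split_ifs with h1 h2
    · simp
    · exact ih (t + score) (i + 1)
    · exact ih t (i + 1)

theorem pvFirstCross_lb (win : Int) (c : String) (xs : List (String × Int)) :
    ∀ (t i j : Int), pvFirstCross win c xs t i = some j → i ≤ j := by
  induction xs with
  | nil => intro t i j h; simp [pvFirstCross] at h
  | cons p rest ih =>
    intro t i j h
    obtain ⟨name, score⟩ := p
    simp only [pvFirstCross] at h
    split_ifs at h with h1 h2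
    · simp at h; omega
    · have := ih (t + score) (i + 1) j h; omega
    · have := ih t (i + 1) j h; omega

theorem pvBestFold_congr (f g : String → Int → Option Int) (cts : List (String × Int)) (acc : Option (Int × String))
    (h : ∀ p ∈ cts, f p.1 p.2 = g p.1 p.2) : pvBestFold f cts acc = pvBestFold g cts acc := by
  unfold pvBestFold
  exact PySem.List.foldl_congr_mem _ _ _ _
    (fun acc p hp => by simp only [pvBestStep, h p hp])

theorem pvBestFold_none (f : String → Int → Option Int) (cts : List (String × Int)) (acc : Option (Int × String))
    (h : ∀ p ∈ cts, f p.1 p.2 = none) : pvBestFold f cts acc = acc := by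
  unfold pvBestFold
  rw [PySem.List.foldl_congr_mem _ _ (fun acc _ => acc) _
    (fun acc p hp => by simp only [pvBestStep, h p hp])]
  exact PySem.List.foldl_ignore _ _

theorem pvBestFold_shift (f : String → Int → Option Int) (cts : List (String × Int)) :
    ∀ (acc : Option (Int × String)),
    pvBestFold (fun c t => (f c t).map (· + 1)) cts (acc.map (fun p => (p.1 + 1, p.2))) =
      (pvBestFold f cts acc).map (fun p => (p.1 + 1, p.2)) := by
  induction cts with
  | nil => intro acc; simp [pvBestFold]
  | cons p rest ih =>
    intro acc
    obtain ⟨c, t⟩ := p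
    simp only [pvBestFold, List.foldl_cons] at *
    have hstep : pvBestStep (fun c t => (f c t).map (· + 1)) (acc.map (fun p => (p.1 + 1, p.2))) (c, t) =
        (pvBestStep f acc (c, t)).map (fun p => (p.1 + 1, p.2)) := by
      unfold pvBestStep
      cases hf : f c t with
      | none => simp [hf]
      | some i =>
        cases acc with
        | none => simp [hf]
        | some b =>
          obtain ⟨bi, bn⟩ := b
          by_cases hlt : i < bi
          · simp [hf, hlt, show i + 1 < bi + 1 by omega]
          · simp [hf, hlt, show ¬(i + 1 < bi + 1) by omega]
    rw [hstep, ih (pvBestStep f acc (c, t))]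

theorem pvBestFold_keep_zero (f : String → Int → Option Int) (n : String) (cts : List (String × Int))
    (h : ∀ p ∈ cts, ∀ j, f p.1 p.2 = some j → 0 ≤ j) :
    pvBestFold f cts (some (0, n)) = some (0, n) := by
  induction cts with
  | nil => simp [pvBestFold]
  | cons p rest ih =>
    simp only [pvBestFold, List.foldl_cons]
    have hstep : pvBestStep f (some (0, n)) p = some (0, n) := by
      unfold pvBestStep
      cases hf : f p.1 p.2 with
      | none => rfl
      | some i =>
        have := h p (List.mem_cons_self) i hf
        simp [show ¬(i < 0) by omega]
    rw [hstep]
    exact ih (fun q hq => h q (List.mem_cons_of_mem _ hq))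

theorem pvBestFold_pick_zero (f : String → Int → Option Int) (n : String) :
    ∀ (cts : List (String × Int)) (acc : Option (Int × String)),
    (∀ p ∈ cts, ∀ j, f p.1 p.2 = some j → 0 ≤ j ∧ (j = 0 → p.1 = n)) →
    (∃ t, (n, t) ∈ cts ∧ f n t = some 0) →
    (acc = none ∨ ∃ bi bn, acc = some (bi, bn) ∧ 0 < bi) →
    pvBestFold f cts acc = some (0, n) := by
  intro cts
  induction cts with
  | nil =>
    intro acc h hex hacc
    obtain ⟨t, ht, _⟩ := hex
    simp at ht
  | cons p rest ih =>
    intro acc h hex hacc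
    obtain ⟨c, t⟩ := p
    simp only [pvBestFold, List.foldl_cons]
    cases hf : f c t with
    | none =>
      have hstep : pvBestStep f acc (c, t) = acc := by simp only [pvBestStep, hf]
      rw [hstep]
      obtain ⟨t', ht', hf'⟩ := hex
      rcases List.mem_cons.mp ht' with heq | hmem
      · exfalso
        have : f c t = some 0 := by
          have h1 : c = n := (Prod.mk.injEq _ _ _ _ ▸ heq.symm).1.symm ▸ rfl
          cases heq; exact hf'
        simp [hf] at this
      · exact ih acc (fun q hq => h q (List.mem_cons_of_mem _ hq)) ⟨t', hmem, hf'⟩ hacc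
    | some i =>
      have hi := h (c, t) List.mem_cons_self i hf
      by_cases hzero : i = 0
      · have hcn : c = n := hi.2 hzero
        subst hzero; subst hcn
        have hstep : pvBestStep f acc (c, t) = some (0, c) := by
          rcases hacc with rfl | ⟨bi, bn, rfl, hbi⟩
          · simp only [pvBestStep, hf]
          · simp only [pvBestStep, hf]
            simp [hbi]
        rw [hstep]
        exact pvBestFold_keep_zero f c rest
          (fun q hq j hj => (h q (List.mem_cons_of_mem _ hq) j hj).1)
      · have hpos : 0 < i := by omega
        have hP : pvBestStep f acc (c, t) = none ∨
            ∃ bi bn, pvBestStep f acc (c, t) = some (bi, bn) ∧ 0 < bi := by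
          rcases hacc with rfl | ⟨bi, bn, rfl, hbi⟩
          · exact Or.inr ⟨i, c, by simp only [pvBestStep, hf], hpos⟩
          · by_cases hlt : i < bi
            · exact Or.inr ⟨i, c, by simp only [pvBestStep, hf]; simp [hlt], hpos⟩
            · exact Or.inr ⟨bi, bn, by simp only [pvBestStep, hf]; simp [hlt], hbi⟩
        obtain ⟨t', ht', hf'⟩ := hex
        rcases List.mem_cons.mp ht' with heq | hmem
        · exfalso
          cases heq
          rw [hf'] at hf
          simp at hf
          omega
        · exact ih (pvBestStep f acc (c, t))
            (fun q hq => h q (List.mem_cons_of_mem _ hq)) ⟨t', hmem, hf'⟩ hP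

theorem pvLoopA_eq_bestFold (win : Int) : ∀ (xs : List (String × Int)) (pw : PySem.Dict String Int),
    pw.keys.Nodup →
    pvLoopA win pw xs = (pvBestFold (fun c t => pvFirstCross win c xs t 0) pw.items none).map (·.2) := by
  intro xs
  induction xs with
  | nil =>
    intro pw hnd
    rw [pvBestFold_none _ _ _ (fun p hp => by simp [pvFirstCross])]
    simp [pvLoopA]
  | cons q rest ih =>
    intro pw hnd
    obtain ⟨name, score⟩ := q
    simp only [pvLoopA]
    cases hg : pw.get? name with
    | none =>
      -- no key 'name' in pw: every candidate's scan just skips the head round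
      have hne : ∀ p ∈ pw.items, p.1 ≠ name := by
        intro p hp heq
        exact ((pw.get?_eq_none_iff_not_mem_keys name).mp hg) (heq ▸ pw.mem_keys_of_mem_items hp)
      rw [pvBestFold_congr _ (fun c t => (pvFirstCross win c rest t 0).map (· + 1)) _ _
        (by
          intro p hp
          simp only [pvFirstCross, if_neg (show ¬ (name = p.1) from fun h => hne p hp h.symm)]
          have := pvFirstCross_shift win p.1 rest p.2 0
          simpa using this)]
      have hsh := pvBestFold_shift (fun c t => pvFirstCross win c rest t 0) pw.items none
      simp only [Option.map_none] at hsh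
      rw [hsh, ih pw hnd]
      cases pvBestFold (fun c t => pvFirstCross win c rest t 0) pw.items none with
      | none => rfl
      | some b => rfl
    | some old =>
      by_cases hwin : win ≤ old + score
      · -- the head round is a crossing for candidate 'name': both sides return it
        simp only [if_pos hwin]
        have hpick := pvBestFold_pick_zero (fun c t => pvFirstCross win c ((name, score) :: rest) t 0)
          name pw.items none
          (by
            intro p hp j hj
            refine ⟨pvFirstCross_lb win p.1 _ p.2 0 j hj, ?_⟩
            intro hj0
            by_contra hpn
            simp only [pvFirstCross, if_neg (fun h : name = p.1 => hpn h.symm)] at hj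
            rw [pvFirstCross_shift win p.1 rest p.2 0] at hj
            subst hj0
            cases hx : pvFirstCross win p.1 rest p.2 0 with
            | none => simp [hx] at hj
            | some j' =>
              have := pvFirstCross_lb win p.1 rest p.2 0 j' hx
              simp [hx] at hj
              omega)
          (by
            refine ⟨old, pw.mem_items_of_get?_eq_some hg, ?_⟩
            simp [pvFirstCross, hwin])
          (Or.inl rfl)
        rw [hpick]
        rfl
      · -- no crossing at the head: update 'name''s running total and recurse
        simp only [if_neg hwin]
        have hcont : pw.contains name = true := by
          rw [pw.contains_eq_isSome_get? name, hg]; rfl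
        have hval : ∀ p ∈ pw.items, p.1 = name → p.2 = old := by
          intro p hp hpn
          have := pw.get?_of_mem_items (k := p.1) (v := p.2) hp hnd
          rw [hpn, hg] at this
          exact (Option.some.injEq _ _).mp this.symm
        rw [pvBestFold_congr _
          (fun c t => (pvFirstCross win c rest (if c = name then old + score else t) 0).map (· + 1)) _ _
          (by
            intro p hp
            obtain ⟨pc, pt⟩ := p
            by_cases hpn : pc = name
            · have h2 := hval (pc, pt) hp hpn
              simp only at h2
              subst hpn; subst h2
              simp only [pvFirstCross, if_neg hwin]
              have := pvFirstCross_shift win pc rest (pt + score) 0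
              simpa using this
            · simp only [pvFirstCross, if_neg (show ¬ (name = pc) from fun h => hpn h.symm),
                if_neg hpn]
              have := pvFirstCross_shift win pc rest pt 0
              simpa using this)]
        have hsh := pvBestFold_shift
          (fun c t => pvFirstCross win c rest (if c = name then old + score else t) 0) pw.items none
        simp only [Option.map_none] at hsh
        rw [hsh]
        have hitems : pvBestFold (fun c t => pvFirstCross win c rest t 0)
            (pw.insert name (old + score)).items none =
            pvBestFold (fun c t => pvFirstCross win c rest (if c = name then old + score else t) 0)
              pw.items none := by
          rw [pvBestFold]
          rw [pw.items_insert_of_contains (old + score) hcont]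
          rw [List.foldl_map]
          refine PySem.List.foldl_congr_mem _ _ _ _ ?_
          intro acc p _
          obtain ⟨pc, pt⟩ := p
          by_cases hpn : pc = name
          · subst hpn
            simp [pvBestStep]
          · simp [pvBestStep, hpn]
        have hnd' : (pw.insert name (old + score)).keys.Nodup := by
          rw [pw.keys_insert_of_contains (old + score) hcont]
          exact hnd
        rw [ih (pw.insert name (old + score)) hnd', hitems]
        cases pvBestFold (fun c t => pvFirstCross win c rest (if c = name then old + score else t) 0)
            pw.items none with
        | none => rfl
        | some b => rfl

theorem calc_winner_eq (rounds : List (String × Int)) : calc_winner rounds = calc_winner_alt rounds := by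
  simp only [calc_winner, calc_winner_alt]
  set scores := rounds.foldl (fun d (p : String × Int) => d.insert p.1 (d.getD p.1 0 + p.2)) PySem.Dict.empty with hscores
  set winScore := (PySem.List.max? scores.values (fun v => v)).getD 0 with hwinScore
  set filtered := scores.items.filter (fun p => decide (p.2 = winScore)) with hfiltered
  have hknd : scores.keys.Nodup := by
    rw [hscores]
    exact PySem.Dict.nodup_keys_foldl_insert_key rounds (fun p => p.1)
      (fun d p => d.getD p.1 0 + p.2) PySem.Dict.empty (by simp [pysem])
  have hfnd : (filtered.map (fun p => p.1)).Nodup := by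
    have hsub : (filtered.map (fun p => p.1)).Sublist (scores.items.map (fun p => p.1)) :=
      List.Sublist.map _ List.filter_sublist
    exact (show scores.keys.Nodup from hknd).sublist hsub
  have hpw_items : (filtered.foldl (fun d (p : String × Int) => d.insert p.1 0)
        (PySem.Dict.empty : PySem.Dict String Int)).items
      = filtered.map (fun p => (p.1, (0 : Int))) := by
    rw [PySem.Dict.items_foldl_insert_fresh filtered (fun p => p.1) (fun _ => (0 : Int))
      PySem.Dict.empty (by intro a _; simp [pysem]) hfnd]
    rfl
  set pw := filtered.foldl (fun d (p : String × Int) => d.insert p.1 0)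
    (PySem.Dict.empty : PySem.Dict String Int) with hpw
  have hpwnd : pw.keys.Nodup := by
    show (pw.items.map (fun p => p.1)).Nodup
    rw [hpw_items, List.map_map]
    exact hfnd
  rw [pvLoopA_eq_bestFold winScore rounds pw hpwnd]
  congr 1
  rw [hpw_items, pvBestFold, List.foldl_map, List.foldl_map]
  refine congrArg _ ?_
  refine PySem.List.foldl_congr_mem _ _ _ _ ?_
  intro acc p _
  rfl

-- ===== VERDICT (by name: the statement is the Claim_ definition above) =====
theorem calc_winner_spec : Claim_equal_calc_winner := by
  intro rounds _ _
  unfold Spec_calc_winner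
  exact calc_winner_eq rounds
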